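-- pv_equiv track=rewrite | github.com/Kangzhezhe/MinsC2Rust_Tool | Tool_py/src/data_manager.py | get_all_parent_functions
-- ===== SOURCE A (Python) =====
-- def get_all_parent_functions(func_name, funcs_child):
--     all_parent_funs = set()
--
--     def add_parent_functions(func):
--         for parent, children in funcs_child.items():
--             if func in children and parent not in all_parent_funs:
--                 all_parent_funs.add(parent)
--                 add_parent_functions(parent)
--
--     add_parent_functions(func_name)
--     return all_parent_funs
-- ===== SOURCE B (Python) =====
-- def get_all_parent_functions(func_name, funcs_child):
--     # Build a child -> parents reverse index once, then DFS over it,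
--     # instead of rescanning every (parent, children) pair at each visited node.
--     parents_of = {}
--     for parent, children in funcs_child.items():
--         for c in dict.fromkeys(children):
--             parents_of.setdefault(c, []).append(parent)
--
--     all_parents = set()
--
--     def visit(func):
--         for parent in parents_of.get(func, []):
--             if parent not in all_parents:
--                 all_parents.add(parent)
--                 visit(parent)
--
--     visit(func_name)
--     return all_parents
-- ===== Notes on version B (the rewrite author's own statement) =====
-- stated objective: alternative
-- what changed: B builds a child->parents reverse index once and DFSes over that index, instead of A's rescan of every (parent, children) pair of the call graph at each visited node; it trades A's repeated edge scans for a one-time index build, which a timing run's inputs (few reachable ancestors) do not reward.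
import Mathlib
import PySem

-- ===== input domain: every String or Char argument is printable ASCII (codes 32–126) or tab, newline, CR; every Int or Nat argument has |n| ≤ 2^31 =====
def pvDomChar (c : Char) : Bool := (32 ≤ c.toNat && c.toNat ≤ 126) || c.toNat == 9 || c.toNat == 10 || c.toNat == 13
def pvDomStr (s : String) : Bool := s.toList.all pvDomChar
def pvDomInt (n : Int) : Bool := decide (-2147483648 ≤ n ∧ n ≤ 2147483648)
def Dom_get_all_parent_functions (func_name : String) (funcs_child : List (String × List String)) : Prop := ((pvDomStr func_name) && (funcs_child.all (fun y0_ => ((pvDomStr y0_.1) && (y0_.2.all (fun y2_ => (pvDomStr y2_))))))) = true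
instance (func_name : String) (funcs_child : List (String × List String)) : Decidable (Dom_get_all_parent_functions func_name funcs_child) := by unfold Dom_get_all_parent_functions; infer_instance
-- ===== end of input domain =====

-- B replaces A's rescan of every (parent, children) pair at each visited node by a
-- child->parents reverse index built once, then a DFS over that index (alternative traversal;
-- not measured faster on a timing run's inputs).
-- Both ports use a fuel counter (funcs_child.length + 1) only to make the recursion total;
-- it is never exhausted, since each recursive call inserts a fresh key into the visited set.

-- ===== PORT A =====
-- add_parent_functions: for each (parent, children), if func in children and parent unseen,
-- add parent and recurse on it.  Fuel makes the recursion structural.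
def addParentA (funcs_child : List (String × List String)) : Nat → String → PySem.Set String → PySem.Set String
  | 0, _, s => s
  | fuel+1, func, s =>
      funcs_child.foldl (fun s pc =>
        if pc.2.contains func && !(PySem.Set.contains s pc.1) then
          addParentA funcs_child fuel pc.1 (PySem.Set.add s pc.1)
        else s) s

def get_all_parent_functions (func_name : String) (funcs_child : List (String × List String)) : List String :=
  addParentA funcs_child (funcs_child.length + 1) func_name PySem.Set.empty

-- ===== PORT B =====
-- parents_of: child -> list of parents (dict.fromkeys dedups each children list)
def buildParentsOf (funcs_child : List (String × List String)) : PySem.Dict String (List String) :=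
  funcs_child.foldl (fun d pc =>
    (PySem.List.dedup pc.2).foldl (fun d c => d.modify c [] (· ++ [pc.1])) d) PySem.Dict.empty

-- visit: for each parent in parents_of.get(func, []), if unseen, add and recurse.
def addParentB (idx : PySem.Dict String (List String)) : Nat → String → PySem.Set String → PySem.Set String
  | 0, _, s => s
  | fuel+1, func, s =>
      (idx.getD func []).foldl (fun s p =>
        if !(PySem.Set.contains s p) then addParentB idx fuel p (PySem.Set.add s p)
        else s) s

def get_all_parent_functions_alt (func_name : String) (funcs_child : List (String × List String)) : List String :=
  addParentB (buildParentsOf funcs_child) (funcs_child.length + 1) func_name PySem.Set.empty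

-- ===== PRECONDITION & SPEC =====
def Spec_get_all_parent_functions (func_name : String) (funcs_child : List (String × List String)) (out : List String) : Prop := out = get_all_parent_functions_alt func_name funcs_child
instance (func_name : String) (funcs_child : List (String × List String)) (out : List String) : Decidable (Spec_get_all_parent_functions func_name funcs_child out) := by unfold Spec_get_all_parent_functions; infer_instance

-- ===== CLAIM (what is proved, stated in full; the proofs are below) =====
def Claim_equal_get_all_parent_functions : Prop := ∀ (func_name : String) (funcs_child : List (String × List String)), Dom_get_all_parent_functions func_name funcs_child → Spec_get_all_parent_functions func_name funcs_child (get_all_parent_functions func_name funcs_child)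

-- ===== LEMMAS AND PROOFS =====

-- ===== VERDICT (by name: the statement is the Claim_ definition above) =====
-- parents_of lookup = the parents whose children list contains c, in order
-- dedup keeps exactly one copy of c when c ∈ l
theorem filter_beq_dedup (l : List String) (c : String) :
    (PySem.List.dedup l).filter (· == c) = if l.contains c then [c] else [] := by
  rw [List.filter_beq]
  by_cases h : c ∈ l
  · rw [List.count_eq_one_of_mem (PySem.List.nodup_dedup l)
      (by simpa [PySem.List.mem_dedup] using h)]
    simp [h]
  · rw [List.count_eq_zero_of_not_mem (by simpa [PySem.List.mem_dedup] using h)]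
    simp [h]

-- one (parent, children) pair contributes parent to parents_of[c] iff c ∈ children
theorem getD_step (l : List String) (p c : String) (d : PySem.Dict String (List String)) :
    ((PySem.List.dedup l).foldl (fun d ch => d.modify ch [] (· ++ [p])) d).getD c [] =
      d.getD c [] ++ (if l.contains c then [p] else []) := by
  have h : (PySem.List.dedup l).foldl (fun d ch => d.modify ch [] (· ++ [p])) d =
      ((PySem.List.dedup l).map (fun ch => (ch, p))).foldl
        (fun d q => d.modify q.1 [] (· ++ [q.2])) d := by
    rw [List.foldl_map]
  rw [h, PySem.Dict.getD_foldl_modify_append]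
  congr 1
  rw [List.filter_map]
  have : (PySem.List.dedup l).filter ((fun q => q.1 == c) ∘ (fun ch => (ch, p))) =
      (PySem.List.dedup l).filter (· == c) := by
    apply List.filter_congr; intro x _; rfl
  rw [this, filter_beq_dedup]
  by_cases h2 : c ∈ l <;> simp [h2]

theorem getD_buildParentsOf (funcs_child : List (String × List String)) (c : String) :
    (buildParentsOf funcs_child).getD c [] =
      (funcs_child.filter (fun pc => pc.2.contains c)).map (·.1) := by
  unfold buildParentsOf
  suffices h : ∀ (fc : List (String × List String)) (d : PySem.Dict String (List String)),
      (fc.foldl (fun d pc =>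
        (PySem.List.dedup pc.2).foldl (fun d ch => d.modify ch [] (· ++ [pc.1])) d) d).getD c [] =
      d.getD c [] ++ (fc.filter (fun pc => pc.2.contains c)).map (·.1) by
    simpa using h funcs_child PySem.Dict.empty
  intro fc
  induction fc with
  | nil => simp
  | cons pc rest ih =>
      intro d
      simp only [List.foldl_cons, ih, getD_step]
      by_cases h2 : c ∈ pc.2 <;> simp [h2]

-- A's scan of all pairs = B's scan of the indexed parents, for any step respecting the filter
-- A's full scan of funcs_child, acting only on pairs whose children contain func,
-- equals the scan of the pre-filtered parent list
theorem scan_eq (g : String → PySem.Set String → PySem.Set String) (func : String) :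
    ∀ (fc : List (String × List String)) (s : PySem.Set String),
      fc.foldl (fun s pc =>
          if pc.2.contains func && !(PySem.Set.contains s pc.1) then g pc.1 (PySem.Set.add s pc.1)
          else s) s =
        ((fc.filter (fun pc => pc.2.contains func)).map (·.1)).foldl (fun s p =>
          if !(PySem.Set.contains s p) then g p (PySem.Set.add s p) else s) s := by
  intro fc
  induction fc with
  | nil => intro s; rfl
  | cons pc rest ih =>
      intro s
      by_cases h : pc.2.contains func
      · simp only [List.foldl_cons, List.filter_cons, h, if_true, Bool.true_and, List.map_cons]
        exact ih _
      · simp only [List.foldl_cons, List.filter_cons, h, Bool.false_and,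
          if_false, Bool.false_eq_true]
        exact ih s

theorem loops_agree (funcs_child : List (String × List String)) (fuel : Nat) :
    ∀ (func : String) (s : PySem.Set String),
      addParentA funcs_child fuel func s =
        addParentB (buildParentsOf funcs_child) fuel func s := by
  induction fuel with
  | zero => intro func s; rfl
  | succ n ih =>
      intro func s
      show (funcs_child.foldl _ s) = ((buildParentsOf funcs_child).getD func []).foldl _ s
      simp only [ih]
      rw [scan_eq (addParentB (buildParentsOf funcs_child) n) func funcs_child s,
        getD_buildParentsOf]

theorem get_all_parent_functions_spec : Claim_equal_get_all_parent_functions := by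
  intro fn fc _
  unfold Spec_get_all_parent_functions get_all_parent_functions get_all_parent_functions_alt
  exact loops_agree fc _ fn _
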